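-- pv_equiv track=rewrite | github.com/agarthetiger/hint | hint_cli/parser.py | get_toc
-- ===== SOURCE A (Python) =====
-- from collections import namedtuple
--
-- def get_toc(doc):
--     """ Get a dict representing the Table of Contents for a markdown document.
--
--     Args:
--         doc: List of strings, each string is a line from the
--             markdown document.
--
--     Returns:
--         dict:
--             Keys are the markdown heading names
--             Values are NamedTuples with the start and end index of each section,
--             including any nested subsections. Using the tuple as a slice
--             will return the lines of text in the given section.
--
--     Given a markdown document with the following content:
--     '''# Python
--     ## Lists
--
--     Lists are blah blah blah...
--
--     ## Dicts
--
--     Dicts are blah blah blah...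
--
--     ### Types of dict
--
--     Loads actually...
--     '''
--     The following dict will be returned:
--     {
--         'Python': (0, 13),
--         'Lists': (1, 5),
--         'Dicts': (5, 13),
--         'Types of dict': (9, 13),
--     }
--     The Values are NamedTuples with 'start' and 'end' respectively.
--     If the returned dict is stored in toc, access the end index of
--     the Lists section using `toc['lists'].end`.
--     """
--     toc = []
--     for index, line in enumerate(doc):
--         line = line.strip()
--         if line.startswith("#"):
--             heading = line.split(None, 1)[-1]
--             depth = line.index(" ")
--             toc.append((heading, depth, index))
--
--     # Process list in reverse order so that when processing each entry you
--     # already know the end index for the section.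
--     toc_dict = {}
--     end = {0: len(doc)}
--
--     Section = namedtuple('Section', ['start', 'end'])
--
--     for section in reversed(toc):
--         heading = section[0].lower()
--         depth = section[1]
--         start_index = section[2]
--
--         # Section (start) index is the end index for that depth section or
--         # deeper when traversing the sections in reverse.
--
--         # Find the biggest index which is less than or equal to the depth
--         end_index = end[max(key for key in end.keys() if key <= depth)]
--         #  Set the new end index for sections of this depth
--         end[depth] = start_index
--         # Remove end indexes greater than the current depth
--         end = {k: v for (k, v) in end.items() if k <= depth}
--         toc_dict[heading] = Section(start_index, end_index)
--     return toc_dict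
-- ===== SOURCE B (Python) =====
-- # B: same TOC extraction, but the reverse pass keeps a STACK of open sections
-- # (depths strictly increasing) instead of A's depth->end dict rebuilt with a
-- # max-over-keys rescan each step: each heading is pushed/popped at most once.
-- def get_toc(doc):
--     n = len(doc)
--     heads = [(s.split(None, 1)[-1], s.index(' '), i)
--              for i, line in enumerate(doc) if (s := line.strip()).startswith('#')]
--     toc = {}
--     stack = []  # (depth, start) of already-placed sections, depths strictly increasing
--     for heading, depth, start in reversed(heads):
--         while stack and stack[-1][0] > depth:
--             stack.pop()
--         end = stack[-1][1] if stack else n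
--         if stack and stack[-1][0] == depth:
--             stack.pop()
--         stack.append((depth, start))
--         toc[heading.lower()] = (start, end)
--     return toc
-- ===== Notes on version B (the rewrite author's own statement) =====
-- stated objective: alternative
-- what changed: The reverse pass no longer keeps a depth->end dict that is rescanned (max over filtered keys) and rebuilt (filter + new dict) at every heading; B keeps a stack of open sections with strictly increasing depths, each heading pushed and popped at most once.
import Mathlib
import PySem

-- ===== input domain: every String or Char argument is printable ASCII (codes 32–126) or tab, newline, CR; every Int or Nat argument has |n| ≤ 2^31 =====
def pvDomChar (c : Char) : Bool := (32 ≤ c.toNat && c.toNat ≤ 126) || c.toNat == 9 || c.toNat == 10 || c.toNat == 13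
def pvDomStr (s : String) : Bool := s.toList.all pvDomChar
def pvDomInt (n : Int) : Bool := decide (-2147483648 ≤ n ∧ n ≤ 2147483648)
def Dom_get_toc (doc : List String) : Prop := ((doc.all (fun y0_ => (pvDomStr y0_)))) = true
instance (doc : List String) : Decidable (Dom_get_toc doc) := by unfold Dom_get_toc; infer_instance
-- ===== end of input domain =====

-- B replaces A's depth→end dict (rebuilt with a max-over-keys rescan per heading) by a stack
-- of open sections with strictly increasing depths; the returned dict is proved identical.

-- ===== PORT A =====
def get_toc (doc : List String) : List (String × Int × Int) :=
  -- for index, line in enumerate(doc): collect (heading, depth, index)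
  let toc := (PySem.List.enumerate doc).foldl (fun acc p =>
    let line := PySem.Str.strip p.2
    if PySem.Str.startswith line "#" then
      -- line.split(None, 1)[-1]; the split list is nonempty here, so [-1] never raises
      let heading := (PySem.List.pyGet? (PySem.Str.split₀Max line 1) (-1)).getD ""
      -- line.index(" "): raises ValueError when find = -1; Pre_ excludes that
      let depth := PySem.Str.find line " "
      acc ++ [(heading, depth, p.1)]
    else acc) []
  -- end = {0: len(doc)}; toc_dict = {}; for section in reversed(toc): …
  let st := toc.reverse.foldl
    (fun (s : PySem.Dict Int Int × PySem.Dict String (Int × Int)) sec =>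
      let heading := PySem.Str.lower sec.1
      let depth := sec.2.1
      let start_index := sec.2.2
      -- end[max(key for key in end.keys() if key <= depth)]  (the filtered key list is
      -- nonempty under Pre_: key 0 is always kept, so max()/[] never raise; getD defaults unused)
      let end_index := s.1.getD ((PySem.List.max? ((s.1.keys).filter (fun k => decide (k ≤ depth))) (fun k => k)).getD 0) 0
      let endD := s.1.insert depth start_index
      let endD := PySem.Dict.ofList (endD.items.filter (fun kv => decide (kv.1 ≤ depth)))
      (endD, s.2.insert heading (start_index, end_index)))
    (PySem.Dict.empty.insert 0 (PySem.List.len doc), PySem.Dict.empty)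
  st.2.items

-- ===== PORT B =====
-- while stack and stack[-1][0] > depth: stack.pop()
def popGt (st : List (Int × Int)) (d : Int) : List (Int × Int) :=
  match h : st.getLast? with
  | some t => if d < t.1 then popGt st.dropLast d else st
  | none => st
  termination_by st.length
  decreasing_by
    have hne : st ≠ [] := by intro hn; rw [hn] at h; simp at h
    have h1 : st.dropLast.length = st.length - 1 := List.length_dropLast
    have h2 : 0 < st.length := List.length_pos_iff.mpr hne
    omega

def get_toc_alt (doc : List String) : List (String × Int × Int) :=
  let n : Int := PySem.List.len doc
  -- heads = [(s.split(None,1)[-1], s.index(' '), i) for i, line in enumerate(doc)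
  --          if (s := line.strip()).startswith('#')]
  let heads := (PySem.List.enumerate doc).filterMap (fun p =>
    let s := PySem.Str.strip p.2
    if PySem.Str.startswith s "#" then
      some ((PySem.List.pyGet? (PySem.Str.split₀Max s 1) (-1)).getD "", PySem.Str.find s " ", p.1)
    else none)
  -- toc = {}; stack = []; for heading, depth, start in reversed(heads): …
  let st := heads.reverse.foldl
    (fun (s : PySem.Dict String (Int × Int) × List (Int × Int)) hd =>
      let depth := hd.2.1
      let start := hd.2.2
      let stack := popGt s.2 depth
      let e := match stack.getLast? with | some t => t.2 | none => n
      let stack := if stack.getLast?.map (·.1) = some depth then stack.dropLast else stack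
      let stack := stack ++ [(depth, start)]
      (s.1.insert (PySem.Str.lower hd.1) (start, e), stack))
    (PySem.Dict.empty, [])
  st.1.items

-- ===== PRECONDITION & SPEC =====
-- Pre_ excludes exactly the documents on which A (and B alike) raises ValueError:
-- a line that, after stripping, starts with '#' but contains no space character.
def Pre_get_toc (doc : List String) : Prop :=
  ∀ line ∈ doc, PySem.Str.startswith (PySem.Str.strip line) "#" = true →
    PySem.Str.find (PySem.Str.strip line) " " ≠ -1
instance (doc : List String) : Decidable (Pre_get_toc doc) := by unfold Pre_get_toc; infer_instance

def pvWitness_get_toc : List String := ["# Python", "## Lists", "", "text", "## Dicts", "### Types of dict", "end"]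

def Spec_get_toc (doc : List String) (out : List (String × Int × Int)) : Prop := out = get_toc_alt doc
instance (doc : List String) (out : List (String × Int × Int)) : Decidable (Spec_get_toc doc out) := by unfold Spec_get_toc; infer_instance

-- ===== CLAIM (what is proved, stated in full; the proofs are below) =====
def Claim_equal_get_toc : Prop := ∀ (doc : List String), Dom_get_toc doc → Pre_get_toc doc → Spec_get_toc doc (get_toc doc)

-- ===== LEMMAS AND PROOFS =====

-- the shared heading-extraction pass: A's append-loop equals B's filterMap
lemma extraction_eq (l : List (Int × String)) (acc : List (String × Int × Int)) :
    l.foldl (fun acc p =>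
      let line := PySem.Str.strip p.2
      if PySem.Str.startswith line "#" then
        let heading := (PySem.List.pyGet? (PySem.Str.split₀Max line 1) (-1)).getD ""
        let depth := PySem.Str.find line " "
        acc ++ [(heading, depth, p.1)]
      else acc) acc
    = acc ++ l.filterMap (fun p =>
        let s := PySem.Str.strip p.2
        if PySem.Str.startswith s "#" then
          some ((PySem.List.pyGet? (PySem.Str.split₀Max s 1) (-1)).getD "", PySem.Str.find s " ", p.1)
        else none) := by
  induction l generalizing acc with
  | nil => simp
  | cons p t ih =>
    simp only [List.foldl_cons, List.filterMap_cons]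
    by_cases hc : PySem.Str.startswith (PySem.Str.strip p.2) "#" = true
    · simp only [hc, if_pos, ih]
      simp
    · rw [if_neg hc]
      rw [show (if PySem.Str.startswith (PySem.Str.strip p.2) "#" = true then
          some ((PySem.List.pyGet? (PySem.Str.split₀Max (PySem.Str.strip p.2) 1) (-1)).getD "",
            PySem.Str.find (PySem.Str.strip p.2) " ", p.1) else none) = none from if_neg hc]
      exact ih acc

-- on a key-sorted pair list, filtering (≤ d) is a prefix
lemma filter_le_eq_takeWhile (st : List (Int × Int)) (d : Int)
    (h : st.Pairwise (fun p q => p.1 < q.1)) :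
    st.filter (fun p => decide (p.1 ≤ d)) = st.takeWhile (fun p => decide (p.1 ≤ d)) := by
  induction st with
  | nil => rfl
  | cons x t ih =>
    rcases List.pairwise_cons.mp h with ⟨hx, ht⟩
    by_cases hxd : x.1 ≤ d
    · simp [hxd, ih ht]
    · have : ∀ p ∈ t, ¬ (p.1 ≤ d) := fun p hp => by have := hx p hp; omega
      simp only [List.filter_cons, List.takeWhile_cons, decide_eq_true_eq]
      rw [if_neg (by simpa using hxd), if_neg (by simpa using hxd)]
      exact List.filter_eq_nil_iff.mpr (fun p hp => by simpa using this p hp)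

-- B's pop-while-greater is that same prefix
lemma popGt_eq_takeWhile (st : List (Int × Int)) (d : Int)
    (h : st.Pairwise (fun p q => p.1 < q.1)) :
    popGt st d = st.takeWhile (fun p => decide (p.1 ≤ d)) := by
  induction st using List.reverseRecOn with
  | nil => simp [popGt]
  | append_singleton l t ih =>
    rcases List.pairwise_append.mp h with ⟨hl, -, hlt⟩
    rw [popGt]
    split
    case h_2 heq => rw [List.getLast?_concat] at heq; exact absurd heq (by simp)
    case h_1 t' heq =>
    rw [List.getLast?_concat] at heq
    injection heq with heq
    subst heq
    by_cases hd : d < t.1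
    · rw [if_pos hd, List.dropLast_concat, ih hl, List.takeWhile_append]
      split
      · next heq =>
        have : List.takeWhile (fun p => decide (p.1 ≤ d)) l = l :=
          (List.takeWhile_sublist _).eq_of_length heq
        rw [this]
        simp [show ¬ (t.1 ≤ d) by omega]
      · rfl
    · rw [if_neg hd]
      symm
      exact List.takeWhile_eq_self_iff.mpr (fun x hx => by
        rcases List.mem_append.mp hx with hx | hx
        · have := hlt x hx t (by simp); simp; omega
        · simp at hx; subst hx; simp; omega)

-- max of a strictly increasing Int list is its last element
lemma max?_of_sorted (l : List Int) (h : l.Pairwise (· < ·)) :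
    PySem.List.max? l (fun k => k) = l.getLast? := by
  induction l using List.reverseRecOn with
  | nil => rfl
  | append_singleton t x ih =>
    rcases List.pairwise_append.mp h with ⟨ht, -, hlt⟩
    unfold PySem.List.max? at ih ⊢
    rw [List.foldl_append, ih ht]
    simp only [List.getLast?_concat, List.foldl_cons, List.foldl_nil]
    cases hg : t.getLast? with
    | none => rfl
    | some m =>
      have hm : m ∈ t := List.mem_of_getLast? hg
      have : m < x := hlt m hm x (by simp)
      simp [this]

-- ofList on fresh distinct keys is the identity on items
lemma ofList_items_of_nodup (ps : List (Int × Int)) (h : (ps.map Prod.fst).Nodup) :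
    (PySem.Dict.ofList ps).items = ps := by
  show (PySem.Dict.empty.update ps).items = ps
  unfold PySem.Dict.update
  rw [PySem.Dict.items_foldl_insert_fresh ps Prod.fst Prod.snd PySem.Dict.empty
       (fun a _ => by simp [pysem]) h]
  simp [PySem.Dict.empty]


-- getLast? of a cons with nonempty tail
lemma getLast?_cons_ne {α : Type} (a : α) (l : List α) (h : l ≠ []) :
    (a :: l).getLast? = l.getLast? := by
  cases l with
  | nil => simp at h
  | cons x t => simp [List.getLast?_cons]

-- when no key equals d, the (≤ d) and (< d) prefixes coincide
lemma takeWhile_le_eq_lt (st : List (Int × Int)) (d : Int) (hm : d ∉ st.map Prod.fst) :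
    st.takeWhile (fun p => decide (p.1 ≤ d)) = st.takeWhile (fun p => decide (p.1 < d)) := by
  induction st with
  | nil => rfl
  | cons x t ih =>
    simp only [List.map_cons, List.mem_cons, not_or] at hm
    have hne : x.1 ≠ d := fun h => hm.1 h.symm
    simp only [List.takeWhile_cons, decide_eq_true_eq]
    by_cases hx : x.1 < d
    · rw [if_pos (by omega), if_pos hx, ih hm.2]
    · rw [if_neg (by omega), if_neg hx]

-- when key d occurs in a key-sorted list, the (≤ d) prefix is the (< d) prefix plus that entry
lemma takeWhile_le_decomp (st : List (Int × Int)) (d : Int)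
    (h : st.Pairwise (fun p q => p.1 < q.1)) (hm : d ∈ st.map Prod.fst) :
    ∃ vd, st.takeWhile (fun p => decide (p.1 ≤ d))
            = st.takeWhile (fun p => decide (p.1 < d)) ++ [(d, vd)] ∧ (d, vd) ∈ st := by
  induction st with
  | nil => simp at hm
  | cons x t ih =>
    rcases List.pairwise_cons.mp h with ⟨hx, ht⟩
    simp only [List.map_cons, List.mem_cons] at hm
    rcases hm with hm | hm
    · have hxe : x = (d, x.2) := by
        obtain ⟨a, b⟩ := x
        simp only at hm
        subst hm
        rfl
      refine ⟨x.2, ?_, by rw [← hxe]; exact List.mem_cons_self⟩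
      have hall : ∀ p ∈ t, ¬ (p.1 ≤ d) := fun p hp => by have := hx p hp; omega
      have h1 : t.takeWhile (fun p => decide (p.1 ≤ d)) = [] := by
        cases htl : t with
        | nil => rfl
        | cons y u =>
          simp only [List.takeWhile_cons, decide_eq_true_eq]
          rw [if_neg (hall y (by simp [htl]))]
      simp only [List.takeWhile_cons, decide_eq_true_eq]
      rw [if_pos (by omega), if_neg (by omega), h1, ← hxe]
      simp
    · have hne : x.1 ≠ d := by
        intro he
        rcases List.mem_map.mp hm with ⟨p, hp, hp1⟩
        have := hx p hp
        omega
      rcases ih ht hm with ⟨vd, hv, hvm⟩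
      have hx1 : x.1 < d := by
        rcases List.mem_map.mp hm with ⟨p, hp, hp1⟩
        have := hx p hp
        omega
      refine ⟨vd, ?_, List.mem_cons_of_mem _ hvm⟩
      simp only [List.takeWhile_cons, decide_eq_true_eq]
      rw [if_pos (by omega), if_pos hx1, hv]
      simp

-- replacing the key-d entry and filtering (≤ d) yields prefix-below-d plus the new entry
lemma map_replace_filter (st : List (Int × Int)) (d i : Int)
    (h : st.Pairwise (fun p q => p.1 < q.1)) (hm : d ∈ st.map Prod.fst) :
    (st.map (fun p => if p.1 == d then (d, i) else p)).filter (fun p => decide (p.1 ≤ d))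
      = st.takeWhile (fun p => decide (p.1 < d)) ++ [(d, i)] := by
  induction st with
  | nil => simp at hm
  | cons x t ih =>
    rcases List.pairwise_cons.mp h with ⟨hx, ht⟩
    simp only [List.map_cons, List.mem_cons] at hm
    by_cases hxd : x.1 = d
    · have hall : ∀ p ∈ t, ¬ (p.1 ≤ d) := fun p hp => by have := hx p hp; omega
      have hrep : t.map (fun p => if p.1 == d then (d, i) else p) = t := by
        calc t.map (fun p => if p.1 == d then (d, i) else p)
            = t.map id := List.map_congr_left (fun p hp => by
                rw [if_neg (by simp; have := hx p hp; omega)]; rfl)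
          _ = t := List.map_id t
      rw [List.map_cons, hrep]
      rw [show (if (x.1 == d) = true then ((d, i) : Int × Int) else x) = (d, i) from
        if_pos (by simp [hxd])]
      rw [List.filter_cons]
      rw [if_pos (decide_eq_true (show ((d, i) : Int × Int).1 ≤ d from le_refl d))]
      rw [List.filter_eq_nil_iff.mpr (fun p hp => by simpa using hall p hp)]
      rw [List.takeWhile_cons]
      rw [if_neg (by simp [hxd])]
      simp
    · rcases hm with hm | hm
      · exact absurd hm.symm hxd
      have hx1 : x.1 < d := by
        rcases List.mem_map.mp hm with ⟨p, hp, hp1⟩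
        have := hx p hp
        omega
      rw [List.map_cons]
      rw [show (if (x.1 == d) = true then ((d, i) : Int × Int) else x) = x from
        if_neg (by simp [hxd])]
      rw [List.filter_cons]
      rw [if_pos (decide_eq_true (show x.1 ≤ d by omega))]
      rw [List.takeWhile_cons]
      rw [if_pos (decide_eq_true hx1)]
      rw [ih ht hm]
      simp

-- the new stack / end-dict tail is key-sorted again, with sentinel 0
lemma pw_new (st : List (Int × Int)) (n d i : Int) (hd1 : 1 ≤ d)
    (h : ((0, n) :: st).Pairwise (fun p q => p.1 < q.1)) :
    ((0, n) :: (st.takeWhile (fun p => decide (p.1 < d)) ++ [(d, i)])).Pairwise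
      (fun p q => p.1 < q.1) := by
  rcases List.pairwise_cons.mp h with ⟨h0, hst⟩
  have hsub := List.takeWhile_sublist (l := st) (fun p => decide (p.1 < d))
  refine List.pairwise_cons.mpr ⟨?_, ?_⟩
  · intro p hp
    rcases List.mem_append.mp hp with hp | hp
    · exact h0 p (hsub.mem hp)
    · simp at hp; rw [hp]; simpa using hd1
  · refine List.pairwise_append.mpr ⟨hst.sublist hsub, by simp, ?_⟩
    intro p hp q hq
    simp at hq
    have := List.mem_takeWhile_imp hp
    simp at this
    rw [hq]
    simpa using this

-- keys of a key-sorted item list are distinct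
lemma keys_nodup_of_pw (L : List (Int × Int)) (h : L.Pairwise (fun p q => p.1 < q.1)) :
    (L.map Prod.fst).Nodup :=
  List.pairwise_map.mpr (h.imp (fun hlt => by omega))

-- A's end-index lookup equals B's stack-top end
lemma end_eq (stk : List (Int × Int)) (n d : Int) (hd1 : 1 ≤ d)
    (hpw : ((0, n) :: stk).Pairwise (fun p q => p.1 < q.1)) :
    (PySem.Dict.mk ((0, n) :: stk)).getD
      ((PySem.List.max? (((PySem.Dict.mk ((0, n) :: stk)).keys).filter
          (fun k => decide (k ≤ d))) (fun k => k)).getD 0) 0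
      = (match (popGt stk d).getLast? with | some t => t.2 | none => n) := by
  have hstk : stk.Pairwise (fun p q => p.1 < q.1) := (List.pairwise_cons.mp hpw).2
  have hkeys : (PySem.Dict.mk ((0, n) :: stk)).keys = (0 : Int) :: stk.map Prod.fst := rfl
  rw [hkeys, popGt_eq_takeWhile stk d hstk]
  have hf : ((0 : Int) :: stk.map Prod.fst).filter (fun k => decide (k ≤ d))
      = 0 :: (stk.takeWhile (fun p => decide (p.1 ≤ d))).map Prod.fst := by
    simp only [List.filter_cons, decide_eq_true_eq]
    rw [if_pos (by omega), List.filter_map, ← filter_le_eq_takeWhile stk d hstk]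
    rfl
  rw [hf]
  set T := stk.takeWhile (fun p => decide (p.1 ≤ d)) with hT
  have hTsub : T.Sublist stk := List.takeWhile_sublist _
  have hpwf : ((0 : Int) :: T.map Prod.fst).Pairwise (· < ·) := by
    have h2 : ((0, n) :: T).Pairwise (fun p q => p.1 < q.1) :=
      hpw.sublist (List.Sublist.cons₂ _ hTsub)
    have := List.pairwise_map.mpr (h2.imp (fun h => h))
    simpa [List.pairwise_map] using this
  rw [max?_of_sorted _ hpwf]
  cases hTl : T.getLast? with
  | none =>
    rw [List.getLast?_eq_none_iff.mp hTl]
    simp [PySem.Dict.getD, PySem.Dict.get?]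
  | some p =>
    have hTne : T ≠ [] := by intro hn; rw [hn] at hTl; simp at hTl
    have hmapne : T.map Prod.fst ≠ [] := by simpa using hTne
    rw [getLast?_cons_ne _ _ hmapne, List.getLast?_map, hTl]
    have hpm : p ∈ stk := hTsub.mem (List.mem_of_getLast? hTl)
    have hmem : ((p.1, p.2) : Int × Int) ∈ (PySem.Dict.mk ((0, n) :: stk)).items := by
      rw [Prod.mk.eta]
      exact List.mem_cons_of_mem _ hpm
    have hnd : (PySem.Dict.mk ((0, n) :: stk)).keys.Nodup := keys_nodup_of_pw _ hpw
    have := PySem.Dict.getD_of_mem_items _ hmem hnd 0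
    simpa using this

-- A's insert-then-filter end dict equals sentinel + B's new stack
lemma endD_eq (stk : List (Int × Int)) (n d i : Int) (hd1 : 1 ≤ d)
    (hpw : ((0, n) :: stk).Pairwise (fun p q => p.1 < q.1)) :
    (PySem.Dict.ofList
        (((PySem.Dict.mk ((0, n) :: stk)).insert d i).items.filter
          (fun kv => decide (kv.1 ≤ d)))).items
      = (0, n) :: (stk.takeWhile (fun p => decide (p.1 < d)) ++ [(d, i)]) := by
  have hstk : stk.Pairwise (fun p q => p.1 < q.1) := (List.pairwise_cons.mp hpw).2
  have key : (((PySem.Dict.mk ((0, n) :: stk)).insert d i).items.filter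
      (fun kv => decide (kv.1 ≤ d)))
      = (0, n) :: (stk.takeWhile (fun p => decide (p.1 < d)) ++ [(d, i)]) := by
    by_cases hm : d ∈ stk.map Prod.fst
    · have hc : (PySem.Dict.mk ((0, n) :: stk)).contains d = true := by
        rcases List.mem_map.mp hm with ⟨p, hp, hp1⟩
        unfold PySem.Dict.contains
        rw [List.any_eq_true]
        exact ⟨p, List.mem_cons_of_mem _ hp, by simp [hp1]⟩
      have hitems : (((PySem.Dict.mk ((0, n) :: stk)).insert d i).items)
          = ((0, n) :: stk).map (fun p => if p.1 == d then (d, i) else p) := by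
        unfold PySem.Dict.insert
        rw [if_pos hc]
      rw [hitems, List.map_cons]
      rw [show (if (((0, n) : Int × Int).1 == d) = true then ((d, i) : Int × Int) else (0, n))
            = (0, n) from if_neg (by simp; omega)]
      rw [List.filter_cons]
      rw [if_pos (decide_eq_true (show ((0, n) : Int × Int).1 ≤ d from by show (0 : Int) ≤ d; omega))]
      rw [map_replace_filter stk d i hstk hm]
    · have hc : (PySem.Dict.mk ((0, n) :: stk)).contains d = false := by
        unfold PySem.Dict.contains
        rw [List.any_eq_false]
        intro p hp
        rcases List.mem_cons.mp hp with rfl | hp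
        · simp; omega
        · simp only [beq_iff_eq]
          intro he
          exact absurd (List.mem_map.mpr ⟨p, hp, he⟩) hm
      have hitems : (((PySem.Dict.mk ((0, n) :: stk)).insert d i).items)
          = ((0, n) :: stk) ++ [(d, i)] := by
        unfold PySem.Dict.insert
        rw [if_neg (by simp [hc])]
      rw [hitems, List.cons_append, List.filter_cons]
      rw [if_pos (decide_eq_true (show ((0, n) : Int × Int).1 ≤ d from by show (0 : Int) ≤ d; omega))]
      rw [List.filter_append]
      rw [filter_le_eq_takeWhile stk d hstk, takeWhile_le_eq_lt stk d hm]
      simp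
  rw [key]
  exact ofList_items_of_nodup _ (keys_nodup_of_pw _ (pw_new stk n d i hd1 hpw))

-- B's stack update written through takeWhile
lemma stack_eq (stk : List (Int × Int)) (d i : Int)
    (hstk : stk.Pairwise (fun p q => p.1 < q.1)) :
    ((if (popGt stk d).getLast?.map (·.1) = some d
        then (popGt stk d).dropLast else popGt stk d) ++ [(d, i)])
      = stk.takeWhile (fun p => decide (p.1 < d)) ++ [(d, i)] := by
  rw [popGt_eq_takeWhile stk d hstk]
  set T := stk.takeWhile (fun p => decide (p.1 ≤ d)) with hT
  by_cases hm : d ∈ stk.map Prod.fst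
  · rcases takeWhile_le_decomp stk d hstk hm with ⟨vd, hv, -⟩
    rw [← hT] at hv
    rw [hv, List.getLast?_concat]
    rw [if_pos (by simp), List.dropLast_concat]
  · have hcond : ¬ (T.getLast?.map (·.1) = some d) := by
      intro hsome
      cases hTl : T.getLast? with
      | none => rw [hTl] at hsome; simp at hsome
      | some p =>
        rw [hTl] at hsome
        simp only [Option.map_some, Option.some.injEq] at hsome
        have hpm : p ∈ stk := (List.takeWhile_sublist _).mem (List.mem_of_getLast? hTl)
        exact hm (by rw [← hsome]; exact List.mem_map.mpr ⟨p, hpm, rfl⟩)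
    rw [if_neg hcond, hT, takeWhile_le_eq_lt stk d hm]

-- the simulation, in foldr form: A's (end-dict, toc-dict) state vs B's (toc-dict, stack) state
lemma sim_aux (n : Int) (hs : List (String × Int × Int)) (hd : ∀ e ∈ hs, 1 ≤ e.2.1) :
    ∃ stk,
      (hs.foldr (fun sec (s : PySem.Dict Int Int × PySem.Dict String (Int × Int)) =>
          (PySem.Dict.ofList ((s.1.insert sec.2.1 sec.2.2).items.filter
              (fun kv => decide (kv.1 ≤ sec.2.1))),
           s.2.insert (PySem.Str.lower sec.1) (sec.2.2,
             s.1.getD ((PySem.List.max? ((s.1.keys).filter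
               (fun k => decide (k ≤ sec.2.1))) (fun k => k)).getD 0) 0)))
        (PySem.Dict.empty.insert 0 n, PySem.Dict.empty)).1.items = (0, n) :: stk
    ∧ (hs.foldr (fun sec (s : PySem.Dict Int Int × PySem.Dict String (Int × Int)) =>
          (PySem.Dict.ofList ((s.1.insert sec.2.1 sec.2.2).items.filter
              (fun kv => decide (kv.1 ≤ sec.2.1))),
           s.2.insert (PySem.Str.lower sec.1) (sec.2.2,
             s.1.getD ((PySem.List.max? ((s.1.keys).filter
               (fun k => decide (k ≤ sec.2.1))) (fun k => k)).getD 0) 0)))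
        (PySem.Dict.empty.insert 0 n, PySem.Dict.empty)).2
      = (hs.foldr (fun hd (s : PySem.Dict String (Int × Int) × List (Int × Int)) =>
          (s.1.insert (PySem.Str.lower hd.1) (hd.2.2,
             match (popGt s.2 hd.2.1).getLast? with | some t => t.2 | none => n),
           (if (popGt s.2 hd.2.1).getLast?.map (·.1) = some hd.2.1
              then (popGt s.2 hd.2.1).dropLast else popGt s.2 hd.2.1) ++ [(hd.2.1, hd.2.2)]))
        (PySem.Dict.empty, [])).1
    ∧ (hs.foldr (fun hd (s : PySem.Dict String (Int × Int) × List (Int × Int)) =>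
          (s.1.insert (PySem.Str.lower hd.1) (hd.2.2,
             match (popGt s.2 hd.2.1).getLast? with | some t => t.2 | none => n),
           (if (popGt s.2 hd.2.1).getLast?.map (·.1) = some hd.2.1
              then (popGt s.2 hd.2.1).dropLast else popGt s.2 hd.2.1) ++ [(hd.2.1, hd.2.2)]))
        (PySem.Dict.empty, [])).2 = stk
    ∧ ((0, n) :: stk).Pairwise (fun p q => p.1 < q.1) := by
  induction hs with
  | nil =>
    refine ⟨[], ?_, rfl, rfl, by simp⟩
    show (PySem.Dict.empty.insert (0 : Int) n).items = [(0, n)]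
    simp [PySem.Dict.insert, PySem.Dict.contains, PySem.Dict.empty]
  | cons e t ih =>
    rcases ih (fun x hx => hd x (List.mem_cons_of_mem _ hx)) with ⟨stk, ih1, ih2, ih3, ih4⟩
    have hd1 : 1 ≤ e.2.1 := hd e List.mem_cons_self
    have hstk : stk.Pairwise (fun p q => p.1 < q.1) := (List.pairwise_cons.mp ih4).2
    simp only [List.foldr_cons]
    have hA1 : (t.foldr (fun sec (s : PySem.Dict Int Int × PySem.Dict String (Int × Int)) =>
          (PySem.Dict.ofList ((s.1.insert sec.2.1 sec.2.2).items.filter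
              (fun kv => decide (kv.1 ≤ sec.2.1))),
           s.2.insert (PySem.Str.lower sec.1) (sec.2.2,
             s.1.getD ((PySem.List.max? ((s.1.keys).filter
               (fun k => decide (k ≤ sec.2.1))) (fun k => k)).getD 0) 0)))
        (PySem.Dict.empty.insert 0 n, PySem.Dict.empty)).1
        = PySem.Dict.mk ((0, n) :: stk) := PySem.Dict.ext ih1
    refine ⟨stk.takeWhile (fun p => decide (p.1 < e.2.1)) ++ [(e.2.1, e.2.2)], ?_, ?_, ?_,
      pw_new stk n e.2.1 e.2.2 hd1 ih4⟩
    · show (PySem.Dict.ofList (((_ : PySem.Dict Int Int).insert e.2.1 e.2.2).items.filter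
          (fun kv => decide (kv.1 ≤ e.2.1)))).items = _
      rw [hA1]
      exact endD_eq stk n e.2.1 e.2.2 hd1 ih4
    · show (_ : PySem.Dict String (Int × Int)).insert (PySem.Str.lower e.1) _ = _
      rw [hA1, ih2, ih3]
      congr 1
      rw [Prod.mk.injEq]
      exact ⟨rfl, end_eq stk n e.2.1 hd1 ih4⟩
    · show _ ++ [(e.2.1, e.2.2)] = _
      rw [ih3]
      exact stack_eq stk e.2.1 e.2.2 hstk

-- the simulation in the ports' foldl-over-reverse form
lemma sim (n : Int) (hs : List (String × Int × Int)) (hd : ∀ e ∈ hs, 1 ≤ e.2.1) :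
    (hs.reverse.foldl
      (fun (s : PySem.Dict Int Int × PySem.Dict String (Int × Int)) sec =>
        let heading := PySem.Str.lower sec.1
        let depth := sec.2.1
        let start_index := sec.2.2
        let end_index := s.1.getD ((PySem.List.max? ((s.1.keys).filter (fun k => decide (k ≤ depth))) (fun k => k)).getD 0) 0
        let endD := s.1.insert depth start_index
        let endD := PySem.Dict.ofList (endD.items.filter (fun kv => decide (kv.1 ≤ depth)))
        (endD, s.2.insert heading (start_index, end_index)))
      (PySem.Dict.empty.insert 0 n, PySem.Dict.empty)).2
    = (hs.reverse.foldl
      (fun (s : PySem.Dict String (Int × Int) × List (Int × Int)) hd =>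
        let depth := hd.2.1
        let start := hd.2.2
        let stack := popGt s.2 depth
        let e := match stack.getLast? with | some t => t.2 | none => n
        let stack := if stack.getLast?.map (·.1) = some depth then stack.dropLast else stack
        let stack := stack ++ [(depth, start)]
        (s.1.insert (PySem.Str.lower hd.1) (start, e), stack))
      (PySem.Dict.empty, [])).1 := by
  rw [List.foldl_reverse, List.foldl_reverse]
  rcases sim_aux n hs hd with ⟨stk, h1, h2, h3, h4⟩
  exact h2

-- a stripped line that starts with '#' and contains a space has its first space at index ≥ 1
lemma find_space_ge_one (s : String) (h1 : PySem.Str.startswith s "#" = true)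
    (h2 : PySem.Str.find s " " ≠ -1) : 1 ≤ PySem.Str.find s " " := by
  rw [PySem.Str.find_eq] at h2 ⊢
  have hge : -1 ≤ PySem.Chars.find s.toList " ".toList := PySem.Chars.neg_one_le_find _ _
  have h0 : 0 ≤ PySem.Chars.find s.toList " ".toList := by omega
  by_contra hlt
  have hf0 : PySem.Chars.find s.toList " ".toList = 0 := by omega
  have hsp : " ".toList <+: s.toList := by
    have := (PySem.Chars.find_spec h0).1
    rwa [hf0] at this
  have hhash : "#".toList <+: s.toList :=
    (PySem.Chars.startswith_iff _ _).mp h1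
  rw [show (" " : String).toList = [' '] from rfl] at hsp
  rw [show ("#" : String).toList = ['#'] from rfl] at hhash
  rcases hsp with ⟨t1, ht1⟩
  rcases hhash with ⟨t2, ht2⟩
  rw [← ht2] at ht1
  simp at ht1

-- every extracted depth is ≥ 1 under Pre_
lemma depths_ge_one (doc : List String) (hp : Pre_get_toc doc) :
    ∀ e ∈ (PySem.List.enumerate doc).filterMap (fun p =>
        let s := PySem.Str.strip p.2
        if PySem.Str.startswith s "#" then
          some ((PySem.List.pyGet? (PySem.Str.split₀Max s 1) (-1)).getD "", PySem.Str.find s " ", p.1)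
        else none), 1 ≤ e.2.1 := by
  intro e he
  rcases List.mem_filterMap.mp he with ⟨p, hpe, hf⟩
  have hline : p.2 ∈ doc := by
    rcases (PySem.List.mem_enumerate_iff doc 0 p).mp hpe with ⟨k, hk, rfl⟩
    exact List.getElem_mem hk
  simp only at hf
  by_cases hc : PySem.Str.startswith (PySem.Str.strip p.2) "#" = true
  · rw [if_pos hc] at hf
    injection hf with hf
    have hfind := hp p.2 hline hc
    have := find_space_ge_one _ hc hfind
    rw [← hf]
    simpa using this
  · rw [if_neg hc] at hf
    exact absurd hf (by simp)

-- ===== VERDICT (by name: the statement is the Claim_ definition above) =====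
theorem get_toc_spec : Claim_equal_get_toc := by
  intro doc _ hp
  show get_toc doc = get_toc_alt doc
  unfold get_toc get_toc_alt
  rw [extraction_eq]
  simp only [List.nil_append]
  exact congrArg PySem.Dict.items (sim (PySem.List.len doc) _ (depths_ge_one doc hp))
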